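-- pv_equiv track=rewrite | github.com/upesacm/100DaysOfCode-2025 | DSA/akashyadav_590014126/Day_61_Question_1.py | convert_min_to_max_heap
-- ===== SOURCE A (Python) =====
-- def convert_min_to_max_heap(arr):
--     def max_heapify(arr,n,i):
--         largest=i
--         left=2*i+1
--         right=2*i+2
--
--         if left<n and arr[left]>arr[largest]:
--             largest=left
--         if right<n and arr[right]>arr[largest]:
--             largest=right
--
--         if largest != i:
--             arr[i],arr[largest]=arr[largest],arr[i]
--             max_heapify(arr,n,largest)
--
--     n=len(arr)
--     for i in range(n//2-1,-1,-1):
--         max_heapify(arr,n,i)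
--     return arr
-- ===== SOURCE B (Python) =====
-- def convert_min_to_max_heap(arr):
--     # Same in-place mutation as A; iterative sift-down choosing the larger child first.
--     n = len(arr)
--     for start in range(n // 2 - 1, -1, -1):
--         i = start
--         while 2 * i + 1 < n:
--             c = 2 * i + 1
--             if c + 1 < n and arr[c + 1] > arr[c]:
--                 c += 1
--             if arr[c] > arr[i]:
--                 arr[i], arr[c] = arr[c], arr[i]
--                 i = c
--             else:
--                 break
--     return arr
-- ===== Notes on version B (the rewrite author's own statement) =====
-- stated objective: alternative
-- what changed: The recursive max_heapify is replaced by an iterative sift-down that first selects the larger child and then compares it once against the parent, instead of A's two sequential largest-updates plus tail recursion.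
import Mathlib
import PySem

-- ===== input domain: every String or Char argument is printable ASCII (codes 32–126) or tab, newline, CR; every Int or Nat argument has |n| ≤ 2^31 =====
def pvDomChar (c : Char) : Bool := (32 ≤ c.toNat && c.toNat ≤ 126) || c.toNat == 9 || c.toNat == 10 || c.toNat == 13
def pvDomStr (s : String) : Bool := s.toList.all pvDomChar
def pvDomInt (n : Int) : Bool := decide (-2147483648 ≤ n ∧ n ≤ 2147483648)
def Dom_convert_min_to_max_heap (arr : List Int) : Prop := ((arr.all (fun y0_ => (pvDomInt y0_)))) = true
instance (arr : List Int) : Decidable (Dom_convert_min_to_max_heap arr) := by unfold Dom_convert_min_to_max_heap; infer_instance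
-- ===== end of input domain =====

-- B restructures the inner sift-down: iterative loop that picks the larger child first (alternative decomposition, same cost).
-- Both A and B mutate the argument list in place in Python; the equivalence proved here is about the return value.

-- ===== PORT A =====
-- A's recursive max_heapify; fuel (= n at the top call) only makes the recursion total,
-- it is never exhausted on reachable calls since the index strictly increases below n.
def pvHeapifyA (fuel : Nat) (arr : List Int) (n i : Nat) : List Int :=
  match fuel with
  | 0 => arr
  | fuel + 1 =>
    let left := 2 * i + 1
    let right := 2 * i + 2
    let largest := if left < n ∧ arr.getD left 0 > arr.getD i 0 then left else i
    let largest := if right < n ∧ arr.getD right 0 > arr.getD largest 0 then right else largest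
    if largest ≠ i then
      pvHeapifyA fuel ((arr.set i (arr.getD largest 0)).set largest (arr.getD i 0)) n largest
    else arr

-- for i in range(n//2-1, -1, -1): the index sequence n/2-1, …, 0 (empty when n ≤ 1)
def convert_min_to_max_heap (arr : List Int) : List Int :=
  let n := arr.length
  ((List.range (n / 2)).reverse).foldl (fun a i => pvHeapifyA n a n i) arr

-- ===== PORT B =====
-- B's iterative sift-down (while-loop as tail recursion, same fuel guard as A's port)
def pvSiftB (fuel : Nat) (arr : List Int) (n i : Nat) : List Int :=
  match fuel with
  | 0 => arr
  | fuel + 1 =>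
    if 2 * i + 1 < n then
      let c := if 2 * i + 1 + 1 < n ∧ arr.getD (2 * i + 1 + 1) 0 > arr.getD (2 * i + 1) 0
               then 2 * i + 1 + 1 else 2 * i + 1
      if arr.getD c 0 > arr.getD i 0 then
        pvSiftB fuel ((arr.set i (arr.getD c 0)).set c (arr.getD i 0)) n c
      else arr
    else arr

def convert_min_to_max_heap_alt (arr : List Int) : List Int :=
  let n := arr.length
  ((List.range (n / 2)).reverse).foldl (fun a start => pvSiftB n a n start) arr

-- ===== PRECONDITION & SPEC =====
def Spec_convert_min_to_max_heap (arr : List Int) (out : List Int) : Prop := out = convert_min_to_max_heap_alt arr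
instance (arr : List Int) (out : List Int) : Decidable (Spec_convert_min_to_max_heap arr out) := by unfold Spec_convert_min_to_max_heap; infer_instance

-- ===== CLAIM (what is proved, stated in full; the proofs are below) =====
def Claim_equal_convert_min_to_max_heap : Prop := ∀ (arr : List Int), Dom_convert_min_to_max_heap arr → Spec_convert_min_to_max_heap arr (convert_min_to_max_heap arr)

-- ===== LEMMAS AND PROOFS =====

-- One recursion step of A equals one loop iteration of B, for any fuel.
theorem pvHeapifyA_eq_pvSiftB (fuel : Nat) : ∀ (arr : List Int) (n i : Nat),
    pvHeapifyA fuel arr n i = pvSiftB fuel arr n i := by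
  induction fuel with
  | zero => intro arr n i; rfl
  | succ fuel ih =>
    intro arr n i
    simp only [pvHeapifyA, pvSiftB, show 2 * i + 1 + 1 = 2 * i + 2 from rfl]
    split_ifs <;>
      first
        | rfl
        | exact ih _ n _
        | omega

-- ===== VERDICT (by name: the statement is the Claim_ definition above) =====
theorem convert_min_to_max_heap_spec : Claim_equal_convert_min_to_max_heap := by
  intro arr _
  unfold Spec_convert_min_to_max_heap convert_min_to_max_heap convert_min_to_max_heap_alt
  have : (fun (a : List Int) (i : Nat) => pvHeapifyA arr.length a arr.length i)
       = (fun (a : List Int) (start : Nat) => pvSiftB arr.length a arr.length start) := by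
    funext a i; exact pvHeapifyA_eq_pvSiftB arr.length a arr.length i
  simp only [this]
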